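-- pv_equiv track=rewrite | github.com/bushuyeu/koa | src/koa/dashboard_data.py | _summarize_gpus
-- ===== SOURCE A (Python) =====
-- from typing import Dict, Iterable, List, Optional, Sequence
--
-- def _parse_gres(value: Optional[str]) -> List[dict]:
--     if not value:
--         return []
--     entries: List[dict] = []
--     for token in value.split(","):
--         token = token.strip()
--         if not token:
--             continue
--         pieces = token.split(":")
--         if not pieces:
--             continue
--         kind = pieces[0]
--         model = pieces[1] if len(pieces) > 1 and pieces[1] else None
--         count_value: Optional[int] = None
--         if len(pieces) >= 2 and pieces[-1].isdigit():
--             count_value = int(pieces[-1])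
--         entries.append(
--             {
--                 "raw": token,
--                 "type": kind,
--                 "model": model if (model and (count_value is None or model != str(count_value))) else None,
--                 "count": count_value,
--             }
--         )
--     return entries
--
-- def _summarize_gpus(gres: Optional[str]) -> Optional[str]:
--     entries = _parse_gres(gres)
--     gpu_entries = [entry for entry in entries if entry["type"].startswith("gpu")]
--     if not gpu_entries:
--         return None
--     pieces = []
--     for entry in gpu_entries:
--         label = entry["model"] or entry["type"]
--         if entry["count"]:
--             label = f"{label} x{entry['count']}"
--         pieces.append(label)
--     return ", ".join(pieces) if pieces else None
-- ===== SOURCE B (Python) =====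
-- from typing import Optional
--
--
-- def _summarize_gpus(gres: Optional[str]) -> Optional[str]:
--     # Index-based scan: locate the first/last ':' with find/rfind and slice the
--     # token instead of materialising a pieces list; labels are accumulated into
--     # the result string directly instead of a list joined at the end.
--     out = None
--     for raw in (gres or "").split(","):
--         token = raw.strip()
--         i = token.find(":")
--         kind = token if i < 0 else token[:i]
--         if not kind.startswith("gpu"):
--             continue
--         if i < 0:
--             label = kind
--         else:
--             tail = token[token.rfind(":") + 1:]
--             count = int(tail) if tail.isdigit() else None
--             j = token.find(":", i + 1)
--             mid = token[i + 1:] if j < 0 else token[i + 1:j]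
--             label = mid if mid and (count is None or mid != str(count)) else kind
--             if count:
--                 label = label + " x" + str(count)
--         out = label if out is None else out + ", " + label
--     return out
-- ===== Notes on version B (the rewrite author's own statement) =====
-- stated objective: alternative
-- what changed: B drops A's split-into-pieces pipeline (every token parsed into a dict record by splitting on the colon separator, then a second loop filtering and relabelling the records): it locates the first and last colon with find/rfind, cuts kind/model/count out of the token by slicing, and concatenates each label directly onto the result string instead of joining a list at the end.
import Mathlib
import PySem

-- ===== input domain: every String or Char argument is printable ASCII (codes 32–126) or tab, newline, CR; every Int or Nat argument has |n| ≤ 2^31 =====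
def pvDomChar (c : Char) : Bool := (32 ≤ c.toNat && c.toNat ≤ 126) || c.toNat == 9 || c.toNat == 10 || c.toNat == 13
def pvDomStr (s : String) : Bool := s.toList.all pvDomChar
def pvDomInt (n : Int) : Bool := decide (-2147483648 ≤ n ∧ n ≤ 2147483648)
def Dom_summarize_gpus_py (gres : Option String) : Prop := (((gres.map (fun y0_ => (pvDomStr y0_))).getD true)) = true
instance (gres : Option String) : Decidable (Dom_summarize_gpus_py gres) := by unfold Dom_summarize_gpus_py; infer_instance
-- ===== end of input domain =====

-- B replaces A's split-into-pieces pipeline (each token parsed into a dict record by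
-- splitting on the colon separator, then a second loop filtering and relabelling the
-- records) with an index-based scan: the first and last separator located by find/rfind,
-- the fields cut out by slicing, the labels accumulated directly into the result string.
-- ===== PORT A =====
-- one iteration of the `for token in value.split(",")` loop of _parse_gres:
-- yields [] (a `continue`) or the single entry (raw, type, model, count)
def pvParseToken (tok : String) : List (String × String × Option String × Option Int) :=
  let token := PySem.Str.strip tok
  if PySem.Str.len token = 0 then []
  else
    let pieces := (PySem.Str.split? token ":").getD []   -- sep ":" ≠ "" so split? is `some`
    if pieces = [] then []
    else
      let kind := PySem.List.pyGetD pieces 0 ""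
      let model : Option String :=
        if 1 < pieces.length ∧ PySem.Str.len (PySem.List.pyGetD pieces 1 "") ≠ 0
        then some (PySem.List.pyGetD pieces 1 "") else none
      let count : Option Int :=
        if 2 ≤ pieces.length ∧ PySem.Str.strIsdigit (PySem.List.pyGetD pieces (-1) "")
        then some ((PySem.Int.ofStr? (PySem.List.pyGetD pieces (-1) "")).getD 0)  -- int() cannot raise: the piece is all digits
        else none
      let model2 : Option String :=
        match model with
        | some m =>
          if (match count with
              | none => true
              | some c => decide (m ≠ PySem.Int.toStr c))
          then some m else none
        | none => none
      [(token, kind, model2, count)]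

def pvParseGres (value : Option String) : List (String × String × Option String × Option Int) :=
  match value with
  | none => []
  | some v =>
    if PySem.Str.len v = 0 then []
    else ((PySem.Str.split? v ",").getD []).foldl (fun acc t => acc ++ pvParseToken t) []

-- body of the label loop of _summarize_gpus
def pvLabelOf (e : String × String × Option String × Option Int) : String :=
  let label := e.2.2.1.getD e.2.1
  match e.2.2.2 with
  | some c => if c ≠ 0 then PySem.Str.join "" [label, " x", PySem.Int.toStr c] else label
  | none => label

def summarize_gpus_py (gres : Option String) : Option String :=
  let entries := pvParseGres gres
  let gpu_entries := entries.filter (fun e => PySem.Str.startswith e.2.1 "gpu")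
  if gpu_entries = [] then none
  else
    let pieces := gpu_entries.foldl (fun acc e => acc ++ [pvLabelOf e]) []
    if pieces ≠ [] then some (PySem.Str.join ", " pieces) else none

-- ===== PORT B =====
-- one iteration of B's loop: none for a skipped token, else the label
def pvAltTokenLabel (raw : String) : Option String :=
  let token := PySem.Str.strip raw
  let i := PySem.Str.find token ":"
  let kind := if i < 0 then token else PySem.Str.slice token none (some i)
  if ¬ PySem.Str.startswith kind "gpu" then none          -- `continue`
  else if i < 0 then some kind
  else
    let tail := PySem.Str.slice token (some (PySem.Str.rfind token ":" + 1)) none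
    let count : Option Int :=
      if PySem.Str.strIsdigit tail
      then some ((PySem.Int.ofStr? tail).getD 0)          -- int() cannot raise: all digits
      else none
    let j := PySem.Str.findFrom token ":" (i + 1) none
    let mid := if j < 0 then PySem.Str.slice token (some (i + 1)) none
               else PySem.Str.slice token (some (i + 1)) (some j)
    let label :=
      if PySem.Str.len mid ≠ 0 ∧ count.all (fun c => mid != PySem.Int.toStr c) = true
      then mid else kind
    some (match count with
          | some c => if c ≠ 0 then PySem.Str.join "" [label, " x", PySem.Int.toStr c] else label
          | none => label)

def summarize_gpus_py_alt (gres : Option String) : Option String :=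
  ((PySem.Str.split? (gres.getD "") ",").getD []).foldl
    (fun out raw =>
      match pvAltTokenLabel raw with
      | none => out
      | some label =>
        match out with
        | none => some label
        | some s => some (PySem.Str.join "" [s, ", ", label]))
    none

-- ===== PRECONDITION & SPEC =====
def Spec_summarize_gpus_py (gres : Option String) (out : Option String) : Prop := out = summarize_gpus_py_alt gres
instance (gres : Option String) (out : Option String) : Decidable (Spec_summarize_gpus_py gres out) := by unfold Spec_summarize_gpus_py; infer_instance

-- ===== CLAIM (what is proved, stated in full; the proofs are below) =====
def Claim_equal_summarize_gpus_py : Prop := ∀ (gres : Option String), Dom_summarize_gpus_py gres → Spec_summarize_gpus_py gres (summarize_gpus_py gres)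

-- ===== LEMMAS AND PROOFS =====

theorem pv_prefix_single (c : Char) (l : List Char) :
    List.isPrefixOf [c] l = true ↔ ∃ t, l = c :: t := by
  cases l with
  | nil => simp [List.isPrefixOf]
  | cons x xs =>
    simp only [List.isPrefixOf, Bool.and_true, beq_iff_eq]
    constructor
    · intro h; subst h; exact ⟨xs, rfl⟩
    · rintro ⟨t, ht⟩; cases ht; rfl

theorem pv_find_go_nil (c : Char) (k : Nat) : PySem.Chars.find.go [c] [] k = -1 := by
  simp [PySem.Chars.find.go]

theorem pv_find_go_cons (c x : Char) (xs : List Char) (k : Nat) :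
    PySem.Chars.find.go [c] (x :: xs) k =
      if x = c then (k : Int) else PySem.Chars.find.go [c] xs (k + 1) := by
  rw [PySem.Chars.find.go]
  simp only [List.isPrefixOf, Bool.and_true, beq_iff_eq]
  by_cases h : c = x <;> simp [h, eq_comm]

theorem pv_find_go_not (c : Char) (u : List Char) (k : Nat) (h : c ∉ u) :
    PySem.Chars.find.go [c] u k = -1 := by
  induction u generalizing k with
  | nil => exact pv_find_go_nil c k
  | cons x xs ih =>
    rw [pv_find_go_cons]
    have hx : ¬ x = c := fun he => h (he ▸ List.mem_cons_self)
    rw [if_neg hx]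
    exact ih (k + 1) (fun hm => h (List.mem_cons_of_mem _ hm))

theorem pv_find_go_mem (c : Char) (p r : List Char) (k : Nat) (h : c ∉ p) :
    PySem.Chars.find.go [c] (p ++ c :: r) k = (k : Int) + p.length := by
  induction p generalizing k with
  | nil => simp [pv_find_go_cons]
  | cons x p' ih =>
    have hx : ¬ x = c := fun he => h (he ▸ List.mem_cons_self)
    rw [List.cons_append, pv_find_go_cons, if_neg hx,
        ih (k + 1) (fun hm => h (List.mem_cons_of_mem _ hm))]
    simp only [List.length_cons]
    push_cast
    omega

theorem pv_find_not (c : Char) (u : List Char) (h : c ∉ u) :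
    PySem.Chars.find u [c] = -1 := pv_find_go_not c u 0 h

theorem pv_find_mem (c : Char) (p r : List Char) (h : c ∉ p) :
    PySem.Chars.find (p ++ c :: r) [c] = (p.length : Int) := by
  have := pv_find_go_mem c p r 0 h
  simpa [PySem.Chars.find] using this

-- recursive normal form of str.split(":") on char lists
def pvSplitc (c : Char) : List Char → List (List Char)
  | [] => [[]]
  | x :: xs =>
    if x = c then [] :: pvSplitc c xs
    else
      match pvSplitc c xs with
      | [] => [[x]]
      | h :: t => (x :: h) :: t

def pvConsHead (p : List Char) : List (List Char) → List (List Char)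
  | [] => [p]
  | h :: t => (p ++ h) :: t

theorem pv_splitc_ne_nil (c : Char) (u : List Char) : pvSplitc c u ≠ [] := by
  cases u with
  | nil => simp [pvSplitc]
  | cons x xs =>
    simp only [pvSplitc]
    split
    · simp
    · split <;> simp

theorem pv_consHead_splitc (c x : Char) (xs : List Char) (hx : ¬ x = c) :
    pvSplitc c (x :: xs) = pvConsHead [x] (pvSplitc c xs) := by
  simp only [pvSplitc, if_neg hx]
  rcases h : pvSplitc c xs with _ | ⟨h', t⟩
  · exact absurd h (pv_splitc_ne_nil c xs)
  · simp [pvConsHead]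

theorem pv_consHead_append (p q : List Char) (l : List (List Char)) :
    pvConsHead (p ++ q) l = pvConsHead p (pvConsHead q l) := by
  cases l <;> simp [pvConsHead]

theorem pv_splitOn_go (c : Char) (fuel : Nat) :
    ∀ (l cur acc : _), l.length ≤ fuel →
      PySem.Chars.splitOn.go [c] fuel l cur acc
        = acc.reverse ++ pvConsHead cur.reverse (pvSplitc c l) := by
  induction fuel with
  | zero =>
    intro l cur acc hl
    have : l = [] := List.eq_nil_of_length_eq_zero (Nat.le_zero.mp hl)
    subst this
    rw [PySem.Chars.splitOn.go]
    simp [pvSplitc, pvConsHead]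
  | succ fuel ih =>
    intro l cur acc hl
    cases l with
    | nil =>
      rw [PySem.Chars.splitOn.go]
      simp [pvSplitc, pvConsHead]
      omega
    | cons x xs =>
      have hlen : xs.length ≤ fuel := by simp at hl; omega
      rw [PySem.Chars.splitOn.go]
      by_cases hx : x = c
      · have hpre : List.isPrefixOf [c] (x :: xs) = true :=
          (pv_prefix_single c (x :: xs)).mpr ⟨xs, by rw [hx]⟩
        rw [if_pos hpre]
        have hdrop : List.drop [c].length (x :: xs) = xs := by simp
        rw [hdrop, ih xs [] _ hlen]
        rcases hs : pvSplitc c xs with _ | ⟨h', t⟩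
        · exact absurd hs (pv_splitc_ne_nil c xs)
        · simp [pvSplitc, hx, hs, pvConsHead]
      · have hpre : ¬ List.isPrefixOf [c] (x :: xs) = true := by
          intro hp
          obtain ⟨t, ht⟩ := (pv_prefix_single c (x :: xs)).mp hp
          simp only [List.cons.injEq] at ht
          exact hx ht.1
        rw [if_neg hpre, ih xs (x :: cur) acc hlen]
        rw [pv_consHead_splitc c x xs hx, List.reverse_cons, pv_consHead_append]

theorem pv_splitOn_eq (c : Char) (u : List Char) :
    PySem.Chars.splitOn u [c] = pvSplitc c u := by
  rw [PySem.Chars.splitOn, pv_splitOn_go c (u.length + 1) u [] [] (Nat.le_succ _)]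
  simp only [List.reverse_nil, List.nil_append]
  rcases h : pvSplitc c u with _ | ⟨h', t⟩
  · exact absurd h (pv_splitc_ne_nil c u)
  · simp [pvConsHead]

theorem pv_splitc_not_mem (c : Char) (u : List Char) (h : c ∉ u) :
    pvSplitc c u = [u] := by
  induction u with
  | nil => rfl
  | cons x xs ih =>
    have hx : ¬ x = c := fun he => h (he ▸ List.mem_cons_self)
    rw [pv_consHead_splitc c x xs hx, ih (fun hm => h (List.mem_cons_of_mem _ hm))]
    rfl

theorem pv_splitc_append (c : Char) (p r : List Char) (h : c ∉ p) :
    pvSplitc c (p ++ c :: r) = p :: pvSplitc c r := by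
  induction p with
  | nil => simp [pvSplitc]
  | cons x p' ih =>
    have hx : ¬ x = c := fun he => h (he ▸ List.mem_cons_self)
    rw [List.cons_append, pv_consHead_splitc c x _ hx,
        ih (fun hm => h (List.mem_cons_of_mem _ hm))]
    rfl

theorem pv_splitc_two_le (c : Char) (u : List Char) (h : c ∈ u) :
    2 ≤ (pvSplitc c u).length := by
  induction u with
  | nil => cases h
  | cons x xs ih =>
    by_cases hx : x = c
    · simp only [pvSplitc, if_pos hx, List.length_cons]
      have := List.length_pos_iff.mpr (pv_splitc_ne_nil c xs)
      omega
    · have hm : c ∈ xs := by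
        rcases List.mem_cons.mp h with h1 | h2
        · exact absurd h1.symm hx
        · exact h2
      rw [pv_consHead_splitc c x xs hx]
      rcases hs : pvSplitc c xs with _ | ⟨h', t⟩
      · exact absurd hs (pv_splitc_ne_nil c xs)
      · have := ih hm
        rw [hs] at this
        simpa [pvConsHead] using this

theorem pv_getLast?_splitc (c : Char) (p q : List Char) (h : c ∉ q) :
    (pvSplitc c (p ++ c :: q)).getLast? = some q := by
  induction p with
  | nil =>
    simp only [List.nil_append, pvSplitc, if_pos]
    rw [pv_splitc_not_mem c q h]
    rfl
  | cons x p' ih =>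
    have hmem : c ∈ p' ++ c :: q := List.mem_append_right _ List.mem_cons_self
    by_cases hx : x = c
    · rw [List.cons_append]
      simp only [pvSplitc, if_pos hx]
      rcases hs : pvSplitc c (p' ++ c :: q) with _ | ⟨h', t⟩
      · exact absurd hs (pv_splitc_ne_nil c _)
      · rw [hs] at ih
        simpa using ih
    · rw [List.cons_append, pv_consHead_splitc c x _ hx]
      rcases hs : pvSplitc c (p' ++ c :: q) with _ | ⟨h', t⟩
      · exact absurd hs (pv_splitc_ne_nil c _)
      · have h2 := pv_splitc_two_le c _ hmem
        rw [hs] at h2 ih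
        simp only [List.length_cons] at h2
        rcases t with _ | ⟨t0, ts⟩
        · simp at h2
        · simpa [pvConsHead] using ih

-- rfind on a single-char needle
theorem pv_rfind_go_zero (c : Char) (s : List Char) :
    PySem.Chars.rfind.go s [c] 0 = if List.isPrefixOf [c] s = true then 0 else -1 := by
  rw [PySem.Chars.rfind.go]

theorem pv_rfind_go_succ (c : Char) (s : List Char) (j : Nat) :
    PySem.Chars.rfind.go s [c] (j + 1) =
      if List.isPrefixOf [c] (List.drop (j + 1) s) = true then ((j : Int) + 1)
      else PySem.Chars.rfind.go s [c] j := by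
  rw [PySem.Chars.rfind.go]
  norm_num

theorem pv_rfind_go_mem (c : Char) (p q : List Char) (h : c ∉ q) :
    ∀ j, p.length ≤ j → PySem.Chars.rfind.go (p ++ c :: q) [c] j = (p.length : Int) := by
  intro j
  induction j with
  | zero =>
    intro hj
    have hp : p = [] := List.eq_nil_of_length_eq_zero (Nat.le_zero.mp hj)
    subst hp
    rw [pv_rfind_go_zero]
    simp [List.isPrefixOf]
  | succ j ih =>
    intro hj
    rw [pv_rfind_go_succ]
    by_cases he : p.length = j + 1
    · have : List.drop (j + 1) (p ++ c :: q) = c :: q := by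
        rw [← he, List.drop_left]
      rw [this]
      simp [List.isPrefixOf, he]
    · have hle : p.length ≤ j := by omega
      have hd : List.drop (j + 1) (p ++ c :: q) = List.drop (j + 1 - p.length) (c :: q) := by
        rw [List.drop_append, List.drop_eq_nil_of_le (by omega : p.length ≤ j + 1),
            List.nil_append]
      have hds : List.drop (j + 1 - p.length) (c :: q) = List.drop (j - p.length) q := by
        have : j + 1 - p.length = (j - p.length) + 1 := by omega
        rw [this, List.drop_succ_cons]
      have hpre : ¬ List.isPrefixOf [c] (List.drop (j + 1) (p ++ c :: q)) = true := by
        intro hp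
        obtain ⟨t, ht⟩ := (pv_prefix_single c _).mp hp
        have : c ∈ List.drop (j - p.length) q := by
          rw [← hds, ← hd, ht]; exact List.mem_cons_self
        exact h (List.mem_of_mem_drop this)
      rw [if_neg hpre]
      exact ih hle

theorem pv_rfind_mem (c : Char) (p q : List Char) (h : c ∉ q) :
    PySem.Chars.rfind (p ++ c :: q) [c] = (p.length : Int) := by
  rw [PySem.Chars.rfind]
  exact pv_rfind_go_mem c p q h _ (by simp)

theorem pv_exists_first (c : Char) (u : List Char) (h : c ∈ u) :
    ∃ p r, u = p ++ c :: r ∧ c ∉ p := by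
  refine ⟨u.takeWhile (· != c), (u.dropWhile (· != c)).tail, ?_, ?_⟩
  · have hd : u.dropWhile (· != c) ≠ [] := by
      intro he
      have := List.dropWhile_eq_nil_iff.mp he c h
      simp at this
    rcases he : u.dropWhile (· != c) with _ | ⟨d, ds⟩
    · exact absurd he hd
    · have hhead := List.head?_dropWhile_not (fun x => x != c) u
      rw [he] at hhead
      simp only [List.head?_cons] at hhead
      have hdc : d = c := by simpa using hhead
      have husplit : u = u.takeWhile (· != c) ++ (d :: ds) := by
        conv_lhs => rw [← List.takeWhile_append_dropWhile (p := fun x => x != c) (l := u)]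
        rw [he]
      simpa [hdc] using husplit
  · intro hm
    have := List.mem_takeWhile_imp hm
    simp at this

theorem pv_exists_last (c : Char) (u : List Char) (h : c ∈ u) :
    ∃ p q, u = p ++ c :: q ∧ c ∉ q := by
  obtain ⟨p, r, he, hp⟩ := pv_exists_first c u.reverse (by simpa using h)
  refine ⟨r.reverse, p.reverse, ?_, by simpa using hp⟩
  have := congrArg List.reverse he
  simpa [List.append_assoc] using this

-- pieces-form of one token's contribution (proof-side bridge between the two ports)
def pvPieceLabels (token : String) : List String :=
  let pieces := (PySem.Str.split? (PySem.Str.strip token) ":").getD []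
  let kind := pieces.headD ""
  if ¬ PySem.Str.startswith kind "gpu" then []
  else
    let last := pieces.getLastD ""
    let count : Option Int :=
      if 2 ≤ pieces.length ∧ PySem.Str.strIsdigit last
      then some ((PySem.Int.ofStr? last).getD 0)
      else none
    let model : Option String :=
      if 1 < pieces.length ∧ PySem.Str.len (pieces.getD 1 "") ≠ 0 ∧
         count.all (fun c => pieces.getD 1 "" != PySem.Int.toStr c) = true
      then some (pieces.getD 1 "") else none
    let label := model.getD kind
    [match count with
     | some c => if c ≠ 0 then PySem.Str.join "" [label, " x", PySem.Int.toStr c] else label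
     | none => label]

-- A's model-rule (truthy-model filter then the ≠str(count) check) equals the fused condition
theorem pv_model_eq (len : Nat) (p1 : String) (cnt : Option Int) :
    (match (if 1 < len ∧ PySem.Str.len p1 ≠ 0 then some p1 else none) with
     | some m =>
       if (match cnt with
           | none => true
           | some c => decide (m ≠ PySem.Int.toStr c)) = true
       then some m else none
     | none => none)
    = (if 1 < len ∧ PySem.Str.len p1 ≠ 0 ∧
          cnt.all (fun c => p1 != PySem.Int.toStr c) = true
       then some p1 else none) := by
  by_cases hm : 1 < len ∧ PySem.Str.len p1 ≠ 0
  · have hp : ¬ p1 = "" := by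
      intro he
      rw [he] at hm
      exact hm.2 (by decide)
    rw [if_pos hm]
    cases cnt with
    | none => simp [hm.1, hp]
    | some c =>
      by_cases hne : p1 = PySem.Int.toStr c
      · simp [hm.1, hne]
      · simp [hm.1, hp, hne]
  · rw [if_neg hm, if_neg (by tauto)]

-- per-token agreement of port A's parse-filter-relabel with the pieces form
theorem pv_token_eq (t : String) :
    ((pvParseToken t).filter (fun e => PySem.Str.startswith e.2.1 "gpu")).map pvLabelOf
      = pvPieceLabels t := by
  unfold pvParseToken pvPieceLabels
  by_cases h0 : PySem.Str.len (PySem.Str.strip t) = 0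
  · have ht : PySem.Str.strip t = "" := by
      rw [PySem.Str.len_eq] at h0
      exact String.toList_eq_nil_iff.mp (List.length_eq_zero_iff.mp (by exact_mod_cast h0))
    rw [ht]
    decide
  · simp only [if_neg h0]
    rcases hps : (PySem.Str.split? (PySem.Str.strip t) ":").getD [] with _ | ⟨k, rest⟩
    · simp
      decide
    · simp only [if_neg (List.cons_ne_nil k rest)]
      have hk0 : PySem.List.pyGetD (k :: rest) 0 "" = k := PySem.List.pyGetD_zero_cons k rest ""
      have hk0' : (k :: rest).headD "" = k := rfl
      have hlast : PySem.List.pyGetD (k :: rest) (-1) "" = (k :: rest).getLastD "" := by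
        rcases rest with _ | ⟨r, rs⟩
        · rfl
        · rw [PySem.List.pyGetD_neg_one _ _ (List.cons_ne_nil k (r :: rs)),
              List.getLast_eq_getLastD]
          obtain ⟨x, hx⟩ := Option.isSome_iff_exists.mp
            (List.getLast?_isSome.mpr (List.cons_ne_nil r rs))
          rw [List.getLastD_eq_getLast?, List.getLastD_eq_getLast?, List.getLast?_cons_cons, hx]
          rfl
      have h1 : PySem.List.pyGetD (k :: rest) 1 "" = (k :: rest).getD 1 "" :=
        PySem.List.pyGetD_ofNat' (k :: rest) 1 ""
      rw [hk0, hk0', hlast, h1, pv_model_eq]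
      by_cases hgpu : PySem.Chars.startswith k.toList ['g', 'p', 'u'] = true
      · simp [hgpu, pvLabelOf]
      · simp [hgpu]

theorem pv_colon_toList : (":" : String).toList = [':'] := rfl
theorem pv_token_eq2 (t : String) :
    pvPieceLabels t = (pvAltTokenLabel t).toList := by
  simp only [pvPieceLabels, pvAltTokenLabel]
  generalize PySem.Str.strip t = tok
  have hsplit : (PySem.Str.split? tok ":").getD [] = (pvSplitc ':' tok.toList).map String.ofList := by
    simp only [PySem.Str.split?, PySem.Chars.split?, pv_colon_toList]
    simp [pv_splitOn_eq]
  have hfind : PySem.Str.find tok ":" = PySem.Chars.find tok.toList [':'] := rfl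
  have hoptD : ∀ (c : Prop) (inst : Decidable c) (a b : String),
      (if c then some a else none).getD b = if c then a else b := by
    intro c inst a b
    split_ifs <;> rfl
  by_cases hc : ':' ∈ tok.toList
  · obtain ⟨p, r, hu, hp⟩ := pv_exists_first ':' tok.toList hc
    obtain ⟨p', q, hu', hq⟩ := pv_exists_last ':' tok.toList hc
    have hfp : PySem.Chars.find tok.toList [':'] = (p.length : Int) := by
      rw [hu]; exact pv_find_mem ':' p r hp
    have hlt : ¬ (PySem.Str.find tok ":" < 0) := by
      rw [hfind, hfp]; omega
    have hsp : pvSplitc ':' tok.toList = p :: pvSplitc ':' r := by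
      rw [hu]; exact pv_splitc_append ':' p r hp
    have hkindB : PySem.Str.slice tok none (some (PySem.Str.find tok ":")) = String.ofList p := by
      rw [hfind, hfp]
      simp only [PySem.Str.slice, PySem.Chars.slice_eq_listSlice]
      rw [PySem.List.slice_to _ (by positivity), Int.toNat_natCast, hu, List.take_left]
    have hdropw : List.drop (p.length + 1) tok.toList = r := by
      rw [hu, show p ++ ':' :: r = (p ++ [':']) ++ r by simp,
          show p.length + 1 = (p ++ [':']).length by simp, List.drop_left]
    have hlenw : p.length + 1 ≤ tok.toList.length := by
      rw [hu]; simp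
    have htail : PySem.Str.slice tok (some (PySem.Str.rfind tok ":" + 1)) none
        = String.ofList q := by
      have hrf : PySem.Str.rfind tok ":" = (p'.length : Int) := by
        show PySem.Chars.rfind tok.toList [':'] = _
        rw [hu']; exact pv_rfind_mem ':' p' q hq
      rw [hrf]
      simp only [PySem.Str.slice, PySem.Chars.slice_eq_listSlice]
      rw [show ((p'.length : Int) + 1) = ((p'.length + 1 : Nat) : Int) by push_cast; ring,
          PySem.List.slice_from _ (by positivity), Int.toNat_natCast, hu',
          show p' ++ ':' :: q = (p' ++ [':']) ++ q by simp,
          show p'.length + 1 = (p' ++ [':']).length by simp, List.drop_left]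
    have hff : PySem.Str.findFrom tok ":" (PySem.Str.find tok ":" + 1) none
        = if PySem.Chars.find r [':'] = -1 then -1
          else ((p.length + 1 : Nat) : Int) + PySem.Chars.find r [':'] := by
      rw [hfind, hfp]
      show PySem.Chars.findFrom tok.toList [':'] ((p.length : Int) + 1) none = _
      rw [show ((p.length : Int) + 1) = ((p.length + 1 : Nat) : Int) by push_cast; ring,
          PySem.Chars.findFrom_natCast tok.toList [':'] (p.length + 1) hlenw, hdropw]
    by_cases hcr : ':' ∈ r
    · obtain ⟨pr, rr, hr, hpr⟩ := pv_exists_first ':' r hcr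
      have hfr : PySem.Chars.find r [':'] = (pr.length : Int) := by
        rw [hr]; exact pv_find_mem ':' pr rr hpr
      have hj : PySem.Str.findFrom tok ":" (PySem.Str.find tok ":" + 1) none
          = ((p.length + 1 + pr.length : Nat) : Int) := by
        rw [hff, hfr, if_neg (by omega)]
        push_cast; ring
      have hmid : PySem.Str.slice tok (some (PySem.Str.find tok ":" + 1))
            (some ((p.length + 1 + pr.length : Nat) : Int))
          = String.ofList pr := by
        rw [hfind, hfp]
        simp only [PySem.Str.slice, PySem.Chars.slice_eq_listSlice]
        rw [show ((p.length : Int) + 1) = ((p.length + 1 : Nat) : Int) by push_cast; ring,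
            PySem.List.slice_natCast, hdropw, Nat.add_sub_cancel_left, hr, List.take_left]
      have hspr : pvSplitc ':' r = pr :: pvSplitc ':' rr := by
        rw [hr]; exact pv_splitc_append ':' pr rr hpr
      rw [hsplit, hsp, hspr]
      have hlastc : (p :: pr :: pvSplitc ':' rr).getLast? = some q := by
        have h := pv_getLast?_splitc ':' p' q hq
        rw [← hu', hsp, hspr] at h
        exact h
      have hgetlast : ∀ d, (String.ofList p :: String.ofList pr ::
            List.map String.ofList (pvSplitc ':' rr)).getLastD d
          = String.ofList q := by
        intro d
        rw [List.getLastD_eq_getLast?, show (String.ofList p :: String.ofList pr ::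
              List.map String.ofList (pvSplitc ':' rr))
            = List.map String.ofList (p :: pr :: pvSplitc ':' rr) by simp,
          List.getLast?_map, hlastc]
        rfl
      have hl2 : 2 ≤ (String.ofList p :: String.ofList pr ::
          List.map String.ofList (pvSplitc ':' rr)).length := by
        simp
      have hl1 : 1 < (String.ofList p :: String.ofList pr ::
          List.map String.ofList (pvSplitc ':' rr)).length := by
        simp
      have hjlt2 : ¬ ((((p.length + 1 + pr.length : Nat)) : Int) < 0) := by omega
      simp only [if_neg hlt, hkindB, htail, hj, hmid, List.map_cons, hgetlast, hoptD,
        eq_true hl2, eq_true hl1, true_and, if_neg hjlt2, List.headD_cons,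
        List.getD_cons_succ, List.getD_cons_zero, Option.toList_some, Option.toList_none,
        apply_ite (Option.toList (α := String))]
    · have hfr : PySem.Chars.find r [':'] = -1 := pv_find_not ':' r hcr
      have hj : PySem.Str.findFrom tok ":" (PySem.Str.find tok ":" + 1) none = -1 := by
        rw [hff, hfr, if_pos rfl]
      have hmid : PySem.Str.slice tok (some (PySem.Str.find tok ":" + 1)) none
          = String.ofList r := by
        rw [hfind, hfp]
        simp only [PySem.Str.slice, PySem.Chars.slice_eq_listSlice]
        rw [show ((p.length : Int) + 1) = ((p.length + 1 : Nat) : Int) by push_cast; ring,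
            PySem.List.slice_from _ (by positivity), Int.toNat_natCast, hdropw]
      have hspr : pvSplitc ':' r = [r] := pv_splitc_not_mem ':' r hcr
      rw [hsplit, hsp, hspr]
      have hlastc : (p :: [r]).getLast? = some q := by
        have h := pv_getLast?_splitc ':' p' q hq
        rw [← hu', hsp, hspr] at h
        exact h
      have hrq : r = q := by simpa using hlastc
      subst hrq
      have hl2 : 2 ≤ ([String.ofList p, String.ofList r] : List String).length := by
        simp
      have hl1 : 1 < ([String.ofList p, String.ofList r] : List String).length := by
        simp
      have hgetlast : ∀ d, ([String.ofList p, String.ofList r] : List String).getLastD d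
          = String.ofList r := by
        intro d; rfl
      simp only [if_neg hlt, hkindB, htail, hj, hmid, List.map_cons, List.map_nil, hgetlast,
        hoptD, eq_true hl2, eq_true hl1, true_and,
        if_pos (show (-1 : Int) < 0 by norm_num), List.headD_cons,
        List.getD_cons_succ, List.getD_cons_zero, Option.toList_some, Option.toList_none,
        apply_ite (Option.toList (α := String))]
  · have hf1 : PySem.Chars.find tok.toList [':'] = -1 := pv_find_not ':' tok.toList hc
    have hlt : PySem.Str.find tok ":" < 0 := by rw [hfind, hf1]; omega
    have hsp : pvSplitc ':' tok.toList = [tok.toList] := pv_splitc_not_mem ':' tok.toList hc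
    rw [hsplit, hsp]
    have hn2 : ¬ (2 ≤ ([tok] : List String).length) := by simp
    have hn1 : ¬ (1 < ([tok] : List String).length) := by simp
    simp only [if_pos hlt, List.map_cons, List.map_nil, String.ofList_toList,
      eq_false hn2, eq_false hn1, false_and, if_false, Option.getD_none,
      List.headD_cons, Option.toList_some, Option.toList_none,
      apply_ite (Option.toList (α := String))]

theorem pv_join_single (l : String) : PySem.Str.join ", " [l] = l := by
  apply String.toList_inj.mp
  simp [PySem.Str.join, PySem.Chars.join, List.intercalate]

theorem pv_join_merge (ls : List String) (x z : String) :
    PySem.Str.join ", " (PySem.Str.join "" [x, ", ", z] :: ls)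
      = PySem.Str.join ", " (x :: z :: ls) := by
  apply String.toList_inj.mp
  cases ls with
  | nil => simp [PySem.Str.join, PySem.Chars.join, List.intercalate]
  | cons y ys => simp [PySem.Str.join, PySem.Chars.join, List.intercalate]

theorem pv_join_foldl (ls : List String) : ∀ l : String,
    ls.foldl (fun a lab => PySem.Str.join "" [a, ", ", lab]) l
      = PySem.Str.join ", " (l :: ls) := by
  induction ls with
  | nil => intro l; exact (pv_join_single l).symm
  | cons a ls ih =>
    intro l
    rw [List.foldl_cons, ih, pv_join_merge]

theorem pv_foldB (ts : List String) :
    ∀ (acc : Option String),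
      ts.foldl (fun out raw =>
          match pvAltTokenLabel raw with
          | none => out
          | some label =>
            match out with
            | none => some label
            | some s => some (PySem.Str.join "" [s, ", ", label])) acc
      = match acc with
        | some s => some ((ts.flatMap (fun r => (pvAltTokenLabel r).toList)).foldl
            (fun a l => PySem.Str.join "" [a, ", ", l]) s)
        | none =>
          match ts.flatMap (fun r => (pvAltTokenLabel r).toList) with
          | [] => none
          | l :: ls => some (ls.foldl (fun a l => PySem.Str.join "" [a, ", ", l]) l) := by
  induction ts with
  | nil => intro acc; cases acc <;> rfl
  | cons t ts ih =>
    intro acc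
    rw [List.foldl_cons]
    rcases hlab : pvAltTokenLabel t with _ | lab
    · simp only []
      rw [ih acc]
      simp [hlab]
    · simp only []
      cases acc with
      | none =>
        rw [ih (some lab)]
        simp [hlab]
      | some s =>
        rw [ih (some (PySem.Str.join "" [s, ", ", lab]))]
        simp [hlab]

theorem pv_main (gres : Option String) :
    summarize_gpus_py gres = summarize_gpus_py_alt gres := by
  cases gres with
  | none => decide
  | some v =>
    by_cases h0 : PySem.Str.len v = 0
    · have hv : v = "" := by
        rw [PySem.Str.len_eq] at h0
        exact String.toList_eq_nil_iff.mp (List.length_eq_zero_iff.mp (by exact_mod_cast h0))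
      subst hv
      decide
    · simp only [summarize_gpus_py, summarize_gpus_py_alt, pvParseGres, Option.getD_some,
        if_neg h0]
      have hent : ((PySem.Str.split? v ",").getD []).foldl
            (fun acc t => acc ++ pvParseToken t) []
          = ((PySem.Str.split? v ",").getD []).flatMap pvParseToken := by
        rw [PySem.List.foldl_append_eq_flatMap]
        exact List.nil_append _
      rw [hent, pv_foldB]
      set gpu := ((((PySem.Str.split? v ",").getD []).flatMap pvParseToken).filter
        (fun e => PySem.Str.startswith e.2.1 "gpu")) with hgpu
      have hmap : gpu.map pvLabelOf
          = ((PySem.Str.split? v ",").getD []).flatMap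
              (fun r => (pvAltTokenLabel r).toList) := by
        rw [hgpu, List.filter_flatMap, List.map_flatMap]
        have hfun : (fun t => ((pvParseToken t).filter
            (fun e => PySem.Str.startswith e.2.1 "gpu")).map pvLabelOf)
            = fun t => (pvAltTokenLabel t).toList :=
          funext (fun t => (pv_token_eq t).trans (pv_token_eq2 t))
        rw [hfun]
      have hfold : gpu.foldl (fun acc e => acc ++ [pvLabelOf e]) [] = gpu.map pvLabelOf := by
        rw [PySem.List.foldl_append_singleton_eq_map]
        exact List.nil_append _
      rw [hfold]
      rcases hL : ((PySem.Str.split? v ",").getD []).flatMap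
          (fun r => (pvAltTokenLabel r).toList) with _ | ⟨l, ls⟩
      · have hg : gpu = [] := by
          have := hmap.trans hL
          exact List.map_eq_nil_iff.mp this
        simp [hg]
      · have hg : gpu ≠ [] := by
          intro he
          rw [he] at hmap
          rw [hL] at hmap
          exact List.cons_ne_nil l ls hmap.symm
        rw [if_neg hg, hmap, hL, if_pos (List.cons_ne_nil l ls)]
        exact congrArg some (pv_join_foldl ls l).symm

-- ===== VERDICT (by name: the statement is the Claim_ definition above) =====
theorem summarize_gpus_py_spec : Claim_equal_summarize_gpus_py := by
  intro gres _
  unfold Spec_summarize_gpus_py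
  exact pv_main gres
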